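-- pv_equiv track=rewrite | github.com/PositivPy/CleanCorp | .ipynb_checkpoints/cleancorp-checkpoint.py | build_term_set
-- ===== SOURCE A (Python) =====
-- def build_term_set(input_dic):
--     """
--     Build tuples and sort by term length
--     @input: {'key' : [term_list], }
--     @return: [[key, term ], ]
--     """
--     tuple_list = []
--     for key in input_dic:
--         for item in input_dic[key]:
--             temp_tuple = key, item
--             tuple_list.append(temp_tuple)
--
--     tuple_list = sorted(tuple_list, key=lambda part: len(part[1]), reverse=True)
--
--     return tuple_list
-- ===== SOURCE B (Python) =====
-- def build_term_set(input_dic):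
--     """Flatten the dict to (key, term) tuples, grouped into length buckets,
--     then emit buckets from longest to shortest term length."""
--     buckets = {}
--     for key in input_dic:
--         for term in input_dic[key]:
--             buckets.setdefault(len(term), []).append((key, term))
--     result = []
--     for length in sorted(buckets, reverse=True):
--         result += buckets[length]
--     return result
-- ===== Notes on version B (the rewrite author's own statement) =====
-- stated objective: alternative
-- what changed: B replaces the comparison sort of the flattened tuple list by a one-pass bucketing of tuples into a dict keyed by term length, then concatenates the buckets in descending key order (a bucket sort by length).
import Mathlib
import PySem

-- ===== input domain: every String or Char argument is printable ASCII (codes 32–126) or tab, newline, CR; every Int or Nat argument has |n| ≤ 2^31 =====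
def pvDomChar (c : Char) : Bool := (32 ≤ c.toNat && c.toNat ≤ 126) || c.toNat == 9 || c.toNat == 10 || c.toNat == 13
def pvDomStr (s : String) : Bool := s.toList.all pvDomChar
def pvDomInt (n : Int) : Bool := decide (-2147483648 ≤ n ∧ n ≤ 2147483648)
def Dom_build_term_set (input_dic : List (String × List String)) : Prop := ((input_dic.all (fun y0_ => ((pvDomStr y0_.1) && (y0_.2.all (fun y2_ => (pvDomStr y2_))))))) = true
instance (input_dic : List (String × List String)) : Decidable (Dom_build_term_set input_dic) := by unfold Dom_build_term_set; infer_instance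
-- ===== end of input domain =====

-- B buckets the (key, term) tuples by term length in one pass and emits the buckets
-- in descending length order, instead of comparison-sorting the flattened list.

-- ===== PORT A =====
def build_term_set (input_dic : List (String × List String)) : List (String × String) :=
  -- tuple_list = []; for key in input_dic: for item in input_dic[key]: tuple_list.append((key, item))
  let tuple_list : List (String × String) :=
    input_dic.foldl (fun acc kv =>
      kv.2.foldl (fun acc item => acc ++ [(kv.1, item)]) acc) []
  -- sorted(tuple_list, key=lambda part: len(part[1]), reverse=True)
  PySem.List.sorted tuple_list (fun part => PySem.Str.len part.2) true

-- ===== PORT B =====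
def build_term_set_alt (input_dic : List (String × List String)) : List (String × String) :=
  -- buckets = {}; for key in input_dic: for term in input_dic[key]: buckets.setdefault(len(term), []).append((key, term))
  let buckets : PySem.Dict Int (List (String × String)) :=
    input_dic.foldl (fun d kv =>
      kv.2.foldl (fun d term =>
        d.modify (PySem.Str.len term) [] (fun b => b ++ [(kv.1, term)])) d)
      PySem.Dict.empty
  -- result = []; for length in sorted(buckets, reverse=True): result += buckets[length]
  (PySem.List.sorted buckets.keys (fun k => k) true).foldl
    (fun result length => result ++ buckets.getD length []) []

-- ===== PRECONDITION & SPEC =====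
def Spec_build_term_set (input_dic : List (String × List String)) (out : List (String × String)) : Prop :=
  out = build_term_set_alt input_dic
instance (input_dic : List (String × List String)) (out : List (String × String)) : Decidable (Spec_build_term_set input_dic out) := by
  unfold Spec_build_term_set; infer_instance

-- ===== CLAIM (what is proved, stated in full; the proofs are below) =====
def Claim_equal_build_term_set : Prop := ∀ (input_dic : List (String × List String)), Dom_build_term_set input_dic → Spec_build_term_set input_dic (build_term_set input_dic)

-- ===== LEMMAS AND PROOFS =====

-- the flattened (key, term) list both programs traverse
def pvPairs (input_dic : List (String × List String)) : List (String × String) :=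
  input_dic.flatMap (fun kv => kv.2.map (fun t => (kv.1, t)))

-- x slides past a prefix it is not inserted before
theorem insertBy_append_of_all_false {α : Type} (bef : α → α → Bool) (x : α) :
    ∀ (A B : List α), (∀ a ∈ A, bef x a = false) →
      PySem.List.insertBy bef x (A ++ B) = A ++ PySem.List.insertBy bef x B := by
  intro A
  induction A with
  | nil => intro B _; simp
  | cons a A ih =>
    intro B h
    simp only [List.cons_append, PySem.List.insertBy, h a (by simp)]
    simp only [Bool.false_eq_true, if_false]
    rw [ih B (fun a ha => h a (by simp [ha]))]

-- x is inserted in front of a list it beats entirely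
theorem insertBy_of_all_true {α : Type} (bef : α → α → Bool) (x : α) (B : List α)
    (h : ∀ a ∈ B, bef x a = true) :
    PySem.List.insertBy bef x B = x :: B := by
  cases B with
  | nil => rfl
  | cons b B => simp [PySem.List.insertBy, h b (by simp)]

theorem flatMap_congr_mem {α β : Type} (l : List α) (f g : α → List β)
    (h : ∀ a ∈ l, f a = g a) : l.flatMap f = l.flatMap g := by
  induction l with
  | nil => rfl
  | cons a l ih => simp [List.flatMap_cons, h a (by simp), ih (fun a ha => h a (by simp [ha]))]

-- inserting x into the bucket decomposition appends it to its own bucket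
theorem insertBy_buckets {α : Type} (keyf : α → Int) (x : α) :
    ∀ (ks : List Int) (L : List α), ks.Pairwise (· > ·) → keyf x ∈ ks →
      PySem.List.insertBy (fun a b => decide (keyf b < keyf a)) x
          (ks.flatMap (fun k => L.filter (fun y => keyf y == k)))
        = ks.flatMap (fun k => (L ++ [x]).filter (fun y => keyf y == k)) := by
  intro ks
  induction ks with
  | nil => intro L _ hx; simp at hx
  | cons k ks ih =>
    intro L hp hx
    have hgt : ∀ k' ∈ ks, k' < k := by
      intro k' hk'; exact (List.pairwise_cons.mp hp).1 k' hk'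
    have hrest : ∀ a ∈ ks.flatMap (fun k => L.filter (fun y => keyf y == k)), keyf a < k := by
      intro a ha
      rcases List.mem_flatMap.mp ha with ⟨k', hk', haf⟩
      have := (List.mem_filter.mp haf).2
      have : keyf a = k' := by simpa using this
      rw [this]; exact hgt k' hk'
    have hbucket : ∀ a ∈ L.filter (fun y => keyf y == k), keyf a = k := by
      intro a ha
      have := (List.mem_filter.mp ha).2
      simpa using this
    by_cases hxk : keyf x = k
    · -- x lands at the end of the head bucket
      simp only [List.flatMap_cons]
      rw [insertBy_append_of_all_false _ x _ _
          (by intro a ha; rw [hbucket a ha]; simp [hxk])]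
      rw [insertBy_of_all_true _ x _
          (by intro a ha; have := hrest a ha; simp [hxk]; omega)]
      have hfk : (L ++ [x]).filter (fun y => keyf y == k) =
          L.filter (fun y => keyf y == k) ++ [x] := by
        simp [List.filter_append, hxk]
      have hfk' : ks.flatMap (fun k' => (L ++ [x]).filter (fun y => keyf y == k')) =
          ks.flatMap (fun k' => L.filter (fun y => keyf y == k')) := by
        apply flatMap_congr_mem
        intro k' hk'
        have hne : keyf x ≠ k' := by have := hgt k' hk'; omega
        simp [List.filter_append, hne]
      rw [hfk, hfk']
      simp
    · -- x belongs to a later bucket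
      have hx' : keyf x ∈ ks := by
        rcases hx with _ | h
        · exact absurd rfl hxk
        · assumption
      have hxlt : keyf x < k := hgt _ hx'
      simp only [List.flatMap_cons]
      rw [insertBy_append_of_all_false _ x _ _
          (by intro a ha; rw [hbucket a ha]; simp; omega)]
      have hfk : (L ++ [x]).filter (fun y => keyf y == k) =
          L.filter (fun y => keyf y == k) := by
        simp [List.filter_append, hxk]
      rw [hfk, ih L (List.pairwise_cons.mp hp).2 hx']

-- stable reverse sort by key = concatenation of the original-order buckets, keys descending
theorem sorted_rev_eq_flatMap_filter {α : Type} (keyf : α → Int) :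
    ∀ (L : List α) (ks : List Int), ks.Pairwise (· > ·) → (∀ x ∈ L, keyf x ∈ ks) →
      PySem.List.sorted L keyf true = ks.flatMap (fun k => L.filter (fun x => keyf x == k)) := by
  intro L
  induction L using List.reverseRecOn with
  | nil => intro ks _ _; simp [PySem.List.sorted]
  | append_singleton L x ih =>
    intro ks hp hmem
    have hstep : PySem.List.sorted (L ++ [x]) keyf true =
        PySem.List.insertBy (fun a b => decide (keyf b < keyf a)) x
          (PySem.List.sorted L keyf true) := by
      simp [PySem.List.sorted, List.foldl_append]
    rw [hstep, ih ks hp (fun y hy => hmem y (by simp [hy]))]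
    exact insertBy_buckets keyf x ks L hp (hmem x (by simp))

-- A's nested append loop builds pvPairs
theorem tupleList_eq_pairs (input_dic : List (String × List String)) :
    input_dic.foldl (fun acc kv => kv.2.foldl (fun acc item => acc ++ [(kv.1, item)]) acc) []
      = pvPairs input_dic := by
  unfold pvPairs
  suffices h : ∀ (l : List (String × List String)) (acc : List (String × String)),
      l.foldl (fun acc kv => kv.2.foldl (fun acc item => acc ++ [(kv.1, item)]) acc) acc
        = acc ++ l.flatMap (fun kv => kv.2.map (fun t => (kv.1, t))) by
    simpa using h input_dic []
  intro l
  induction l with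
  | nil => intro acc; simp
  | cons kv l ih =>
    intro acc
    simp only [List.foldl_cons, ih, List.flatMap_cons]
    rw [PySem.List.foldl_append_singleton_eq_map]
    simp

-- B's nested bucket loop is the flat bucket loop over pvPairs
theorem bucketFold_eq_pairsFold (input_dic : List (String × List String)) :
    input_dic.foldl (fun d kv =>
        kv.2.foldl (fun d term =>
          d.modify (PySem.Str.len term) [] (fun b => b ++ [(kv.1, term)])) d)
      PySem.Dict.empty
    = (pvPairs input_dic).foldl
        (fun d p => d.modify (PySem.Str.len p.2) [] (fun b => b ++ [p])) PySem.Dict.empty := by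
  unfold pvPairs
  suffices h : ∀ (l : List (String × List String)) (d0 : PySem.Dict Int (List (String × String))),
      l.foldl (fun d kv =>
          kv.2.foldl (fun d term =>
            d.modify (PySem.Str.len term) [] (fun b => b ++ [(kv.1, term)])) d) d0
        = (l.flatMap (fun kv => kv.2.map (fun t => (kv.1, t)))).foldl
            (fun d p => d.modify (PySem.Str.len p.2) [] (fun b => b ++ [p])) d0 by
    exact h input_dic _
  intro l
  induction l with
  | nil => intro d0; rfl
  | cons kv l ih =>
    intro d0
    simp only [List.foldl_cons, List.flatMap_cons, List.foldl_append, List.foldl_map]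
    exact ih _

-- the flat bucket loop in the library's (key, value) shape
theorem pairsFold_eq_tagged (pairs : List (String × String)) :
    pairs.foldl (fun d p => d.modify (PySem.Str.len p.2) [] (fun b => b ++ [p])) PySem.Dict.empty
    = (pairs.map (fun p => (PySem.Str.len p.2, p))).foldl
        (fun d q => d.modify q.1 [] (fun b => b ++ [q.2])) PySem.Dict.empty := by
  rw [List.foldl_map]

theorem build_term_set_spec : Claim_equal_build_term_set := by
  unfold Claim_equal_build_term_set
  intro input_dic _
  unfold Spec_build_term_set build_term_set build_term_set_alt
  rw [tupleList_eq_pairs, bucketFold_eq_pairsFold, pairsFold_eq_tagged]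
  set pairs := pvPairs input_dic with hpairs
  set tagged := pairs.map (fun p => (PySem.Str.len p.2, p)) with htagged
  set d := tagged.foldl (fun d q => d.modify q.1 [] (fun b => b ++ [q.2])) PySem.Dict.empty with hd
  -- keys of the bucket dict: the distinct lengths in first-encounter order
  have hkeys : d.keys = PySem.Set.ofList (pairs.map (fun p => PySem.Str.len p.2)) := by
    rw [hd, PySem.Dict.keys_foldl_modify_key]
    simp [htagged, PySem.Dict.keys_empty, PySem.Set.update, PySem.Set.ofList, List.map_map,
      Function.comp_def]
  have hnodup : d.keys.Nodup := by
    rw [hkeys]; exact PySem.Set.nodup_ofList _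
  -- lookups: each bucket is the original-order filter
  have hgetD : ∀ c, d.getD c [] = pairs.filter (fun p => PySem.Str.len p.2 == c) := by
    intro c
    rw [hd, PySem.Dict.getD_foldl_modify_append]
    simp [htagged, PySem.Dict.getD_empty, List.filter_map, Function.comp_def]
  set ks := PySem.List.sorted d.keys (fun k => k) true with hks
  -- ks is strictly decreasing and contains every length
  have hperm : ks.Perm d.keys := PySem.List.sorted_perm _ _ _
  have hksnodup : ks.Nodup := hperm.nodup_iff.mpr hnodup
  have hdesc : ks.Pairwise (· > ·) := by
    have h1 : ks.Pairwise (fun a b => b ≤ a) := PySem.List.sorted_pairwise_rev _ _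
    have h2 : ks.Pairwise (· ≠ ·) := hksnodup
    exact (h1.and h2).imp (fun h => lt_of_le_of_ne h.1 (Ne.symm h.2))
  have hmem : ∀ x ∈ pairs, PySem.Str.len x.2 ∈ ks := by
    intro x hx
    rw [hks, PySem.List.mem_sorted, hkeys]
    have : PySem.Str.len x.2 ∈ pairs.map (fun p => PySem.Str.len p.2) :=
      List.mem_map_of_mem hx
    simpa [PySem.Set.mem_ofList] using this
  -- both sides are the bucket concatenation
  rw [sorted_rev_eq_flatMap_filter (fun p => PySem.Str.len p.2) pairs ks hdesc hmem]
  -- B's output loop concatenates the buckets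
  rw [PySem.List.foldl_append_eq_flatMap]
  exact flatMap_congr_mem _ _ _ (fun k _ => (hgetD k).symm)
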